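-- pv_equiv track=rewrite | github.com/gustjava/CamaleonTrader-feature_genesis | features/session_mask.py | driver_for_feature
-- ===== SOURCE A (Python) =====
-- from typing import Dict, List, Optional, Union
--
-- def driver_for_feature(name: str, feature_prefix_map: Dict[str, str]) -> Optional[str]:
--     """Infer driver key from a feature name using substring mapping.
--
--     feature_prefix_map: dict where key is substring to search, value is driver key.
--     Returns the first driver whose substring appears in the feature name (case-insensitive),
--     preferring longer substrings first.
--     """
--     if not feature_prefix_map:
--         return None
--     nm = name.lower()
--     # sort substrings by length desc to match most specific first
--     items = sorted(feature_prefix_map.items(), key=lambda kv: len(str(kv[0])), reverse=True)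
--     for sub, drv in items:
--         try:
--             if str(sub).lower() in nm:
--                 return str(drv)
--         except Exception:
--             continue
--     return None
-- ===== SOURCE B (Python) =====
-- def driver_for_feature(name, feature_prefix_map):
--     """Single pass, no sort: keep the longest matching substring seen so far
--     (strict '>' keeps the first-seen one on a length tie, matching the stable sort)."""
--     nm = name.lower()
--     best_len = -1
--     best_drv = None
--     for sub, drv in feature_prefix_map.items():
--         s = str(sub)
--         if s.lower() in nm and len(s) > best_len:
--             best_len = len(s)
--             best_drv = str(drv)
--     return best_drv
-- ===== Notes on version B (the rewrite author's own statement) =====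
-- stated objective: simpler
-- what changed: Replaced sort-by-length-desc-then-first-match with a single pass that keeps the longest matching substring seen so far (strict > preserves the stable sort's first-on-tie rule).
import Mathlib
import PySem

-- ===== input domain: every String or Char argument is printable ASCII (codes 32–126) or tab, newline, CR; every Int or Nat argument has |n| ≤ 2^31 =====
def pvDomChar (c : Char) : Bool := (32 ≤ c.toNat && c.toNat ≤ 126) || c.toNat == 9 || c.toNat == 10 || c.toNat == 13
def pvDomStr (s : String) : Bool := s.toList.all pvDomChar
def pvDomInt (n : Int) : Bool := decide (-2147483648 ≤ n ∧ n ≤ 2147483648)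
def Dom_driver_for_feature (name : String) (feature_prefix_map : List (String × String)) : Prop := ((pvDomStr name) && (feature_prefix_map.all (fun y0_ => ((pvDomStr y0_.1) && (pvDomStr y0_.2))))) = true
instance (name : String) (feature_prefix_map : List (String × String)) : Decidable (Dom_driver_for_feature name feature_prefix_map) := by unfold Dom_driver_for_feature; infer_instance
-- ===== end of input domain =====

-- B replaces A's sort-by-length-then-first-match with a single pass keeping the longest
-- matching substring seen so far (strict '>' reproduces the stable sort's tie rule): simpler, no sort.


-- ===== PORT A =====
-- the for-loop over the sorted items: return str(drv) at the first substring match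
def dffA_loop (nm : String) : List (String × String) → Option String
  | [] => none
  | (sub, drv) :: rest =>
      if PySem.Str.isIn (PySem.Str.lower sub) nm then some drv else dffA_loop nm rest

def driver_for_feature (name : String) (feature_prefix_map : List (String × String)) : Option String :=
  if feature_prefix_map = [] then none
  else
    let nm := PySem.Str.lower name
    let items := PySem.List.sorted feature_prefix_map (fun kv => PySem.Str.len kv.1) true
    dffA_loop nm items

-- ===== PORT B =====
-- the single-pass loop: state (best_len, best_drv), strict '>' on the length
def dffB_step (nm : String) (st : Int × Option String) (p : String × String) : Int × Option String :=
  if PySem.Str.isIn (PySem.Str.lower p.1) nm ∧ PySem.Str.len p.1 > st.1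
  then (PySem.Str.len p.1, some p.2) else st

def driver_for_feature_alt (name : String) (feature_prefix_map : List (String × String)) : Option String :=
  let nm := PySem.Str.lower name
  (feature_prefix_map.foldl (dffB_step nm) (-1, none)).2

-- ===== PRECONDITION & SPEC =====
def Spec_driver_for_feature (name : String) (feature_prefix_map : List (String × String)) (out : Option String) : Prop := out = driver_for_feature_alt name feature_prefix_map
instance (name : String) (feature_prefix_map : List (String × String)) (out : Option String) : Decidable (Spec_driver_for_feature name feature_prefix_map out) := by unfold Spec_driver_for_feature; infer_instance

-- ===== CLAIM (what is proved, stated in full; the proofs are below) =====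
def Claim_equal_driver_for_feature : Prop := ∀ (name : String) (feature_prefix_map : List (String × String)), Dom_driver_for_feature name feature_prefix_map → Spec_driver_for_feature name feature_prefix_map (driver_for_feature name feature_prefix_map)

-- ===== LEMMAS AND PROOFS =====

-- proof-side: first match together with its length (-1 if none)
def dffFML (nm : String) : List (String × String) → Int × Option String
  | [] => (-1, none)
  | (sub, drv) :: rest =>
      if PySem.Str.isIn (PySem.Str.lower sub) nm then (PySem.Str.len sub, some drv)
      else dffFML nm rest

theorem dffA_loop_eq_FML (nm : String) (ys : List (String × String)) :
    dffA_loop nm ys = (dffFML nm ys).2 := by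
  induction ys with
  | nil => rfl
  | cons p rest ih =>
    obtain ⟨sub, drv⟩ := p
    simp only [dffA_loop, dffFML]
    split <;> simp [ih]

theorem dffFML_fst_lt (nm : String) (ys : List (String × String)) (K : Int)
    (hK : 0 ≤ K) (h : ∀ e ∈ ys, PySem.Str.len e.1 < K) : (dffFML nm ys).1 < K := by
  induction ys with
  | nil => simpa [dffFML] using by omega
  | cons p rest ih =>
    obtain ⟨sub, drv⟩ := p
    simp only [dffFML]
    split
    · exact h (sub, drv) (by simp)
    · exact ih (fun e he => h e (by simp [he]))

-- small rewrite kit for the two programs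
theorem dffFML_cons_pos (nm sub drv : String) (rest : List (String × String))
    (h : PySem.Str.isIn (PySem.Str.lower sub) nm = true) :
    dffFML nm ((sub, drv) :: rest) = (PySem.Str.len sub, some drv) := by
  simp only [dffFML]; rw [if_pos h]

theorem dffFML_cons_neg (nm sub drv : String) (rest : List (String × String))
    (h : ¬ PySem.Str.isIn (PySem.Str.lower sub) nm = true) :
    dffFML nm ((sub, drv) :: rest) = dffFML nm rest := by
  simp only [dffFML]; rw [if_neg h]

theorem dffB_step_take (nm sub drv : String) (st : Int × Option String)
    (h : PySem.Str.isIn (PySem.Str.lower sub) nm = true ∧ PySem.Str.len sub > st.1) :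
    dffB_step nm st (sub, drv) = (PySem.Str.len sub, some drv) := by
  simp only [dffB_step]; exact if_pos h

theorem dffB_step_stay (nm sub drv : String) (st : Int × Option String)
    (h : ¬ (PySem.Str.isIn (PySem.Str.lower sub) nm = true ∧ PySem.Str.len sub > st.1)) :
    dffB_step nm st (sub, drv) = st := by
  simp only [dffB_step]; exact if_neg h

theorem dffLen_nonneg (sub : String) : (0:Int) ≤ PySem.Str.len sub := by
  simp [PySem.Str.len_eq]

-- key lemma: inserting x into a key-descending list commutes FML with the B step
theorem dffFML_insertBy (nm : String) (x : String × String) (ys : List (String × String))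
    (hys : ys.Pairwise (fun a b => PySem.Str.len b.1 ≤ PySem.Str.len a.1)) :
    dffFML nm (PySem.List.insertBy
        (fun a b => decide (PySem.Str.len b.1 < PySem.Str.len a.1)) x ys)
      = dffB_step nm (dffFML nm ys) x := by
  induction ys with
  | nil =>
    obtain ⟨sub, drv⟩ := x
    simp only [PySem.List.insertBy]
    by_cases hm : PySem.Str.isIn (PySem.Str.lower sub) nm = true
    · rw [dffFML_cons_pos nm sub drv [] hm,
        dffB_step_take nm sub drv _ ⟨hm, by have := dffLen_nonneg sub; simp only [dffFML]; omega⟩]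
    · rw [dffFML_cons_neg nm sub drv [] hm, dffB_step_stay nm sub drv _ (fun hc => hm hc.1)]
  | cons y rest ih =>
    obtain ⟨sub, drv⟩ := x
    obtain ⟨ysub, ydrv⟩ := y
    rw [List.pairwise_cons] at hys
    simp only [PySem.List.insertBy]
    split <;> rename_i hord
    · -- len ysub < len sub : x goes in front
      simp only [decide_eq_true_eq] at hord
      by_cases hm : PySem.Str.isIn (PySem.Str.lower sub) nm = true
      · -- x matches: B's condition also fires, every first-match length below is < len sub
        have hall : ∀ e ∈ (ysub, ydrv) :: rest, PySem.Str.len e.1 < PySem.Str.len sub := by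
          intro e he
          rcases List.mem_cons.mp he with h | h
          · subst h; exact hord
          · exact lt_of_le_of_lt (hys.1 e h) hord
        have hlt := dffFML_fst_lt nm ((ysub, ydrv) :: rest) (PySem.Str.len sub)
          (dffLen_nonneg sub) hall
        rw [dffFML_cons_pos nm sub drv _ hm, dffB_step_take nm sub drv _ ⟨hm, hlt⟩]
      · rw [dffFML_cons_neg nm sub drv _ hm, dffB_step_stay nm sub drv _ (fun hc => hm hc.1)]
    · -- len sub ≤ len ysub : y stays in front
      simp only [decide_eq_true_eq, not_lt] at hord
      by_cases hm : PySem.Str.isIn (PySem.Str.lower ysub) nm = true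
      · -- y matches: B's step cannot improve on len ysub
        rw [dffFML_cons_pos nm ysub ydrv _ hm, dffFML_cons_pos nm ysub ydrv _ hm,
          dffB_step_stay nm sub drv _ (by rintro ⟨-, hgt⟩; simp at hgt hord; omega)]
      · rw [dffFML_cons_neg nm ysub ydrv _ hm, dffFML_cons_neg nm ysub ydrv _ hm]
        exact ih hys.2

theorem dffFML_sorted (nm : String) (xs : List (String × String)) :
    dffFML nm (PySem.List.sorted xs (fun kv => PySem.Str.len kv.1) true)
      = xs.foldl (dffB_step nm) (-1, none) := by
  induction xs using List.reverseRecOn with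
  | nil => rfl
  | append_singleton xs x ih =>
    rw [PySem.List.sorted_rev_eq_foldl_insertBy, List.foldl_append, List.foldl_append]
    rw [← PySem.List.sorted_rev_eq_foldl_insertBy]
    simp only [List.foldl]
    rw [dffFML_insertBy nm x _ (PySem.List.sorted_pairwise_rev xs _), ih]

-- ===== VERDICT (by name: the statement is the Claim_ definition above) =====
theorem driver_for_feature_spec : Claim_equal_driver_for_feature := by
  intro name fm _
  unfold Spec_driver_for_feature driver_for_feature driver_for_feature_alt
  split <;> rename_i h
  · subst h; rfl
  · rw [dffA_loop_eq_FML, dffFML_sorted]
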